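-- pv_equiv track=rewrite | github.com/Beginn-coder/CS634-AprioriAlgorithm | CS634_Midterm.py | count_itemsets
-- ===== SOURCE A (Python) =====
-- def count_itemsets(transactions, candidates):
--     itemset_count = {itemset: 0 for itemset in candidates}
--     for transaction in transactions['items']:
--         transaction_items = set(transaction.split(','))
--         for itemset in candidates:
--             if set(itemset).issubset(transaction_items):
--                 itemset_count[itemset] += 1
--     return {itemset: count for itemset, count in itemset_count.items() if count > 0}
-- ===== SOURCE B (Python) =====
-- def count_itemsets(transactions, candidates):
--     # candidate-major: count each distinct candidate once against precomputed
--     # transaction sets, then scale by the candidate's multiplicity.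
--     multiplicity = {}
--     for itemset in candidates:
--         multiplicity[itemset] = multiplicity.get(itemset, 0) + 1
--     transaction_sets = [set(t.split(',')) for t in transactions['items']]
--     result = {}
--     for itemset, m in multiplicity.items():
--         items = set(itemset)
--         n = sum(1 for ts in transaction_sets if items <= ts)
--         if n > 0:
--             result[itemset] = m * n
--     return result
-- ===== Notes on version B (the rewrite author's own statement) =====
-- stated objective: alternative
-- what changed: Replaced A's transaction-major nested loop (which re-runs the subset test for every candidate occurrence in every transaction) with a candidate-major pass: build a multiplicity counter of candidates, precompute each transaction's item set once, count matching transactions once per distinct candidate and scale by multiplicity.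
-- outside the precondition, e.g. on count_itemsets({'wrong': []}, []): A raises KeyError, B raises KeyError
import Mathlib
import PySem

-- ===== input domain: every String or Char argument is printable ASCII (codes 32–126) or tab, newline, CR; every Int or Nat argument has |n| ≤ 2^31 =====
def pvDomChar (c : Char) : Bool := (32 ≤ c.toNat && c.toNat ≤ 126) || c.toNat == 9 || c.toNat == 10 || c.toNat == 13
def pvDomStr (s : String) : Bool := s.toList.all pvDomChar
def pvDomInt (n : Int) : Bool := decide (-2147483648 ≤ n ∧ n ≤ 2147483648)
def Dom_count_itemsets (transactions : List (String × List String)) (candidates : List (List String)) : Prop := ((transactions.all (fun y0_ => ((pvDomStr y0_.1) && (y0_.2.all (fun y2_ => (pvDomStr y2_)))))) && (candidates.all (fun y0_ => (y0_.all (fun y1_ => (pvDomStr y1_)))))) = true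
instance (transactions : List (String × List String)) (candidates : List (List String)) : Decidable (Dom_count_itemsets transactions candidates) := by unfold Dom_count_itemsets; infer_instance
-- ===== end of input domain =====

-- B counts each DISTINCT candidate once against precomputed transaction item-sets and
-- scales by the candidate's multiplicity (candidate-major), instead of A's
-- transaction-major nested loop that re-tests every candidate occurrence per transaction.


-- the item set of one transaction string: set(transaction.split(','))
-- (split? is total here: the separator "," is non-empty)
def pvTSet (t : String) : PySem.Set String :=
  PySem.Set.ofList ((PySem.Str.split? t ",").getD [])

-- ===== PORT A =====
def count_itemsets (transactions : List (String × List String)) (candidates : List (List String)) : List (List String × Int) :=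
  match (PySem.Dict.mk transactions).get? "items" with
  | none => []  -- Python raises KeyError here; excluded by Pre_
  | some items =>
    -- itemset_count = {itemset: 0 for itemset in candidates}
    let init : PySem.Dict (List String) Int :=
      candidates.foldl (fun d c => d.insert c 0) PySem.Dict.empty
    -- for transaction in transactions['items']: for itemset in candidates: if subset: += 1
    let final : PySem.Dict (List String) Int :=
      items.foldl (fun d t =>
        let transaction_items := pvTSet t
        candidates.foldl (fun d itemset =>
          if PySem.Set.issubset (PySem.Set.ofList itemset) transaction_items then
            d.modify itemset 0 (· + 1)   -- key always present: initialized to 0 above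
          else d) d) init
    -- {itemset: count for itemset, count in itemset_count.items() if count > 0}
    (final.items.filter (fun p => 0 < p.2))

-- ===== PORT B =====
def count_itemsets_alt (transactions : List (String × List String)) (candidates : List (List String)) : List (List String × Int) :=
  match (PySem.Dict.mk transactions).get? "items" with
  | none => []  -- Python raises KeyError here; excluded by Pre_
  | some items =>
    -- multiplicity[itemset] = multiplicity.get(itemset, 0) + 1
    let multiplicity : PySem.Dict (List String) Int :=
      candidates.foldl (fun d c => d.insert c (d.getD c 0 + 1)) PySem.Dict.empty
    -- transaction_sets = [set(t.split(',')) for t in transactions['items']]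
    let transaction_sets : List (PySem.Set String) := items.map pvTSet
    -- for itemset, m in multiplicity.items(): n = sum(...); if n > 0: result[itemset] = m * n
    let result : PySem.Dict (List String) Int :=
      multiplicity.items.foldl (fun r p =>
        let cs := PySem.Set.ofList p.1
        let n : Int := ((transaction_sets.filter (fun ts => PySem.Set.issubset cs ts)).length : Int)
        if 0 < n then r.insert p.1 (p.2 * n) else r) PySem.Dict.empty
    result.items

-- ===== PRECONDITION & SPEC =====
-- Pre_ excludes exactly the inputs where A raises KeyError: no "items" key in transactions.
def Pre_count_itemsets (transactions : List (String × List String)) (candidates : List (List String)) : Prop :=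
  "items" ∈ transactions.map Prod.fst
instance (transactions : List (String × List String)) (candidates : List (List String)) : Decidable (Pre_count_itemsets transactions candidates) := by unfold Pre_count_itemsets; infer_instance
def pvWitness_count_itemsets : (List (String × List String)) × List (List String) :=
  ([("items", ["a,b", "b"])], [["a"], ["b"]])

def Spec_count_itemsets (transactions : List (String × List String)) (candidates : List (List String)) (out : List (List String × Int)) : Prop := out = count_itemsets_alt transactions candidates
instance (transactions : List (String × List String)) (candidates : List (List String)) (out : List (List String × Int)) : Decidable (Spec_count_itemsets transactions candidates out) := by unfold Spec_count_itemsets; infer_instance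

-- ===== CLAIM (what is proved, stated in full; the proofs are below) =====
def Claim_equal_count_itemsets : Prop := ∀ (transactions : List (String × List String)) (candidates : List (List String)), Dom_count_itemsets transactions candidates → Pre_count_itemsets transactions candidates → Spec_count_itemsets transactions candidates (count_itemsets transactions candidates)

-- ===== LEMMAS AND PROOFS =====

-- A's init dict: lookups are 0 on candidates, keys are the distinct candidates.
theorem pv_init_getD (l : List (List String)) (d : PySem.Dict (List String) Int) (c : List String) :
    (l.foldl (fun d c => d.insert c 0) d).getD c 0 = if c ∈ l then 0 else d.getD c 0 := by
  induction l generalizing d with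
  | nil => simp
  | cons x xs ih =>
    simp only [List.foldl_cons, ih]
    by_cases hm : c ∈ xs
    · simp [hm]
    · rw [PySem.Dict.getD_insert]
      by_cases hc : c = x <;> simp [hc, hm]

theorem pv_init_keys (l : List (List String)) (d : PySem.Dict (List String) Int) :
    (l.foldl (fun d c => d.insert c 0) d).keys = PySem.Set.update d.keys l := by
  exact PySem.Dict.keys_foldl_insert l _ d

-- A's inner loop over candidates: each key gains multiplicity × [matched].
theorem pv_inner_getD (cands : List (List String)) (ts : PySem.Set String)
    (d : PySem.Dict (List String) Int) (c : List String) :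
    (cands.foldl (fun d itemset =>
        if PySem.Set.issubset (PySem.Set.ofList itemset) ts then d.modify itemset 0 (· + 1) else d) d).getD c 0
      = d.getD c 0 + (if PySem.Set.issubset (PySem.Set.ofList c) ts then (cands.count c : Int) else 0) := by
  induction cands generalizing d with
  | nil => simp
  | cons x xs ih =>
    simp only [List.foldl_cons, ih, List.count_cons]
    by_cases hx : PySem.Set.issubset (PySem.Set.ofList x) ts
    · simp only [hx, if_true]
      rw [PySem.Dict.getD_modify]
      by_cases hc : c = x
      · subst hc; simp [hx]; ring
      · have hxc : x ≠ c := fun h => hc h.symm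
        simp [hc, hxc]
    · simp only [hx]
      by_cases hc : c = x
      · subst hc; simp [hx]
      · have hxc : x ≠ c := fun h => hc h.symm
        simp [hxc]

-- A's inner loop keeps the key list unchanged when every candidate is already a key.
theorem pv_inner_keys (cands : List (List String)) (ts : PySem.Set String)
    (d : PySem.Dict (List String) Int) (h : ∀ c ∈ cands, c ∈ d.keys) :
    (cands.foldl (fun d itemset =>
        if PySem.Set.issubset (PySem.Set.ofList itemset) ts then d.modify itemset 0 (· + 1) else d) d).keys
      = d.keys := by
  induction cands generalizing d with
  | nil => rfl
  | cons x xs ih =>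
    simp only [List.foldl_cons]
    by_cases hx : PySem.Set.issubset (PySem.Set.ofList x) ts
    · simp only [hx, if_true]
      have hk : (d.modify x 0 (· + 1)).keys = d.keys := by
        rw [PySem.Dict.keys_modify, PySem.Dict.keys_insert_of_contains]
        rw [PySem.Dict.contains_iff_mem_keys]
        exact h x (by simp)
      rw [ih _ (by intro c hc; rw [hk]; exact h c (by simp [hc]))]
      exact hk
    · simp only [hx]
      exact ih _ (fun c hc => h c (by simp [hc]))

-- A's outer loop over transactions: value = multiplicity × number of matching transactions.
theorem pv_outer_getD (items : List String) (cands : List (List String))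
    (d : PySem.Dict (List String) Int) (c : List String) :
    (items.foldl (fun d t =>
        cands.foldl (fun d itemset =>
          if PySem.Set.issubset (PySem.Set.ofList itemset) (pvTSet t) then d.modify itemset 0 (· + 1) else d) d) d).getD c 0
      = d.getD c 0 + (cands.count c : Int) *
          ((items.filter (fun t => PySem.Set.issubset (PySem.Set.ofList c) (pvTSet t))).length : Int) := by
  induction items generalizing d with
  | nil => simp
  | cons t ts ih =>
    simp only [List.foldl_cons, ih, pv_inner_getD, List.filter_cons]
    by_cases ht : PySem.Set.issubset (PySem.Set.ofList c) (pvTSet t)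
    · simp [ht]; ring
    · simp [ht]

theorem pv_outer_keys (items : List String) (cands : List (List String))
    (d : PySem.Dict (List String) Int) (h : ∀ c ∈ cands, c ∈ d.keys) :
    (items.foldl (fun d t =>
        cands.foldl (fun d itemset =>
          if PySem.Set.issubset (PySem.Set.ofList itemset) (pvTSet t) then d.modify itemset 0 (· + 1) else d) d) d).keys
      = d.keys := by
  induction items generalizing d with
  | nil => rfl
  | cons t ts ih =>
    simp only [List.foldl_cons]
    rw [ih, pv_inner_keys _ _ _ h]
    intro c hc
    rw [pv_inner_keys _ _ _ h]
    exact h c hc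

-- B's result loop: insertion over pairwise-distinct fresh keys builds the filtered list.
theorem pv_b_fold (l : List (List String × Int)) (f : List String → Int)
    (r : PySem.Dict (List String) Int)
    (hnd : (l.map Prod.fst).Nodup) (hfresh : ∀ p ∈ l, r.contains p.1 = false) :
    (l.foldl (fun r p => if 0 < f p.1 then r.insert p.1 (p.2 * f p.1) else r) r).items
      = r.items ++ (l.filter (fun p => 0 < f p.1)).map (fun p => (p.1, p.2 * f p.1)) := by
  induction l generalizing r with
  | nil => simp
  | cons x xs ih =>
    simp only [List.map_cons, List.nodup_cons] at hnd
    simp only [List.foldl_cons, List.filter_cons]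
    by_cases hx : 0 < f x.1
    · simp only [hx, if_true, decide_true]
      rw [ih _ hnd.2]
      · rw [PySem.Dict.items_insert_of_not_contains _ _ (hfresh x (by simp))]
        simp
      · intro p hp
        rw [PySem.Dict.contains_insert]
        have h1 : (p.1 == x.1) = false := by
          simp only [beq_eq_false_iff_ne, ne_eq]
          intro he; exact hnd.1 (he ▸ (List.mem_map_of_mem hp))
        rw [h1, hfresh p (by simp [hp])]
        rfl
    · simp only [hx, if_false, decide_false]
      exact ih _ hnd.2 (fun p hp => hfresh p (by simp [hp]))

-- the count of matching transactions, shared shape of both sides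
theorem pv_n_eq (items : List String) (c : List String) :
    (((items.map pvTSet).filter (fun ts => PySem.Set.issubset (PySem.Set.ofList c) ts)).length : Int)
      = ((items.filter (fun t => PySem.Set.issubset (PySem.Set.ofList c) (pvTSet t))).length : Int) := by
  rw [List.filter_map]
  simp [Function.comp_def]

-- ===== VERDICT (by name: the statement is the Claim_ definition above) =====
theorem count_itemsets_spec : Claim_equal_count_itemsets := by
  intro transactions candidates _hdom _hpre
  unfold Spec_count_itemsets count_itemsets count_itemsets_alt
  cases hg : (PySem.Dict.mk transactions).get? "items" with
  | none => rfl
  | some items =>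
    simp only []
    set N : List String → Int :=
      fun c => ((items.filter (fun t => PySem.Set.issubset (PySem.Set.ofList c) (pvTSet t))).length : Int) with hN
    -- ===== A side =====
    have hinit_keys : (candidates.foldl (fun d c => d.insert c (0 : Int)) PySem.Dict.empty).keys
        = PySem.Set.ofList candidates := by
      rw [pv_init_keys]; rfl
    have hfin_keys : ((items.foldl (fun d t =>
        candidates.foldl (fun d itemset =>
          if PySem.Set.issubset (PySem.Set.ofList itemset) (pvTSet t) then d.modify itemset 0 (· + 1) else d) d)
        (candidates.foldl (fun d c => d.insert c (0 : Int)) PySem.Dict.empty))).keys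
        = PySem.Set.ofList candidates := by
      rw [pv_outer_keys, hinit_keys]
      intro c hc
      rw [hinit_keys, PySem.Set.mem_ofList]
      exact hc
    have hfin_getD : ∀ c, ((items.foldl (fun d t =>
        candidates.foldl (fun d itemset =>
          if PySem.Set.issubset (PySem.Set.ofList itemset) (pvTSet t) then d.modify itemset 0 (· + 1) else d) d)
        (candidates.foldl (fun d c => d.insert c (0 : Int)) PySem.Dict.empty))).getD c 0
        = (candidates.count c : Int) * N c := by
      intro c
      rw [pv_outer_getD, pv_init_getD]
      split <;> simp [PySem.Dict.getD_empty, hN]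
    have hA : (List.filter (fun p => 0 < p.2) ((items.foldl (fun d t =>
        candidates.foldl (fun d itemset =>
          if PySem.Set.issubset (PySem.Set.ofList itemset) (pvTSet t) then d.modify itemset 0 (· + 1) else d) d)
        (candidates.foldl (fun d c => d.insert c (0 : Int)) PySem.Dict.empty))).items)
        = ((PySem.Set.ofList candidates).filter
            (fun c => 0 < (candidates.count c : Int) * N c)).map
            (fun c => (c, (candidates.count c : Int) * N c)) := by
      rw [PySem.Dict.items_eq_map_keys _ (by rw [hfin_keys]; exact PySem.Set.nodup_ofList _) 0]
      rw [hfin_keys, List.filter_map]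
      congr 1
      · funext c
        exact congrArg (Prod.mk c) (hfin_getD c)
      · apply List.filter_congr
        intro c _
        simp only [Function.comp_apply]
        rw [hfin_getD c]
    -- ===== B side =====
    rw [PySem.Dict.foldl_insert_getD_add_one_eq_counter]
    have hfun : (fun (r : PySem.Dict (List String) Int) (p : List String × Int) =>
        if 0 < (((items.map pvTSet).filter (fun ts => PySem.Set.issubset (PySem.Set.ofList p.1) ts)).length : Int) then
          r.insert p.1 (p.2 * (((items.map pvTSet).filter (fun ts => PySem.Set.issubset (PySem.Set.ofList p.1) ts)).length : Int))
        else r)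
        = (fun (r : PySem.Dict (List String) Int) p => if 0 < N p.1 then r.insert p.1 (p.2 * N p.1) else r) := by
      funext r p
      rw [pv_n_eq items p.1]
    have hB : (((PySem.Dict.counter candidates).items).foldl
        (fun (r : PySem.Dict (List String) Int) p => if 0 < N p.1 then r.insert p.1 (p.2 * N p.1) else r)
        PySem.Dict.empty).items
        = (((PySem.Dict.counter candidates).items.filter (fun p => 0 < N p.1)).map
            (fun p => (p.1, p.2 * N p.1))) := by
      have hnd : (((PySem.Dict.counter candidates).items).map Prod.fst).Nodup :=
        PySem.Dict.nodup_keys_counter candidates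
      have := pv_b_fold ((PySem.Dict.counter candidates).items) N PySem.Dict.empty hnd
        (fun p _ => rfl)
      simpa using this
    rw [hA, hfun, hB, PySem.Dict.items_counter, List.filter_map, List.map_map]
    congr 1
    apply List.filter_congr
    intro c hc
    have hmem : c ∈ candidates := (PySem.Set.mem_ofList _ _).mp hc
    have h1 : (0 : Int) < (candidates.count c : Int) := by
      exact_mod_cast List.count_pos_iff.mpr hmem
    have h2 : (0 : Int) ≤ N c := by simp only [hN]; exact Int.natCast_nonneg _
    simp only [Function.comp_apply, decide_eq_decide]
    constructor
    · intro h; nlinarith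
    · intro h; nlinarith
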